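-- pv_equiv track=rewrite | github.com/tal66/aoc | aoc12/aoc.py | check_translation
-- ===== SOURCE A (Python) =====
-- def check_translation(record: list, nums: list) -> bool:
--     idx = 0
--     i = 0
--     while i < len(record):
--         count = 0
--         c = record[i]
--         while c == "#":
--             count += 1
--             i += 1
--             if i == len(record):
--                 break
--             c = record[i]
--
--         if count > 0:
--             if idx == len(nums):
--                 return False
--             if count != nums[idx]:
--                 return False
--             idx += 1
--             i -= 1
--         i += 1
--
--     return idx == len(nums)
-- ===== SOURCE B (Python) =====
-- def check_translation(record: list, nums: list) -> bool:
--     runs = []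
--     cur = 0
--     for c in record:
--         if c == "#":
--             cur += 1
--         elif cur:
--             runs.append(cur)
--             cur = 0
--     if cur:
--         runs.append(cur)
--     return runs == nums
-- ===== Notes on version B (the rewrite author's own statement) =====
-- stated objective: simpler
-- what changed: B builds the full list of '#'-run lengths in one fold and compares it to nums with a single list equality, instead of A's index-walking scan that validates each run against nums[idx] with early returns.
import Mathlib
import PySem

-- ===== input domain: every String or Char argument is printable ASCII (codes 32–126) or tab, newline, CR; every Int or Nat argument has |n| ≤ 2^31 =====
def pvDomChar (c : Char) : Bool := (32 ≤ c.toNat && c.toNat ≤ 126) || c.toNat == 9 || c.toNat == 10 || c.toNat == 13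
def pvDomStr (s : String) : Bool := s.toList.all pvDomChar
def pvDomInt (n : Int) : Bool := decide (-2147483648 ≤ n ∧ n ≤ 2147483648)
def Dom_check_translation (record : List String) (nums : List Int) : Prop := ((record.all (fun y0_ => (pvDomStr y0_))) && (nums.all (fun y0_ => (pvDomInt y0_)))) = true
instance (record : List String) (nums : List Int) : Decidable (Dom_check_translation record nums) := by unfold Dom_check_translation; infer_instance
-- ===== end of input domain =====

-- B replaces A's interleaved per-run validation (scan with index arithmetic and early
-- returns) by building the list of maximal '#'-run lengths in one fold and comparing it
-- to nums with a single list equality; same results, simpler decomposition.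

-- ===== PORT A =====
-- inner while loop of A: advance i over consecutive "#", counting them
def pvInnerA (record : List String) (i count : Nat) : Nat × Nat :=
  if h : i < record.length then
    if record[i] = "#" then pvInnerA record (i + 1) (count + 1) else (i, count)
  else (i, count)
termination_by record.length - i

-- run-length of the all-"#" prefix (used to state pvInnerA's behaviour, incl. termination)
def pvHp : List String → Nat
  | [] => 0
  | c :: t => if c = "#" then pvHp t + 1 else 0

theorem pvInnerA_eq (record : List String) (i count : Nat) :
    pvInnerA record i count =
      (i + pvHp (record.drop i), count + pvHp (record.drop i)) := by
  fun_induction pvInnerA record i count with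
  | case1 i count h hc ih =>
      rw [ih]
      rw [List.drop_eq_getElem_cons h, pvHp, if_pos hc]
      simp only [Prod.mk.injEq]
      omega
  | case2 i count h hc =>
      rw [List.drop_eq_getElem_cons h, pvHp, if_neg hc]
      simp
  | case3 i count h =>
      rw [List.drop_eq_nil_of_le (by omega)]
      simp [pvHp]

-- outer while loop of A
def pvOuterA (record : List String) (nums : List Int) (idx i : Nat) : Bool :=
  if h : i < record.length then
    let p := pvInnerA record i 0
    if hc : 0 < p.2 then
      if idx = nums.length then false
      else if (p.2 : Int) ≠ nums.getD idx 0 then false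
      else pvOuterA record nums (idx + 1) (p.1 - 1 + 1)
    else pvOuterA record nums idx (i + 1)
  else decide (idx = nums.length)
termination_by record.length - i
decreasing_by
  · have heq := pvInnerA_eq record i 0
    have h1 : (pvInnerA record i 0).1 = i + pvHp (record.drop i) := by rw [heq]
    have h2 : (pvInnerA record i 0).2 = 0 + pvHp (record.drop i) := by rw [heq]
    have hc' : 0 < (pvInnerA record i 0).2 := hc
    omega
  · omega

def check_translation (record : List String) (nums : List Int) : Bool :=
  pvOuterA record nums 0 0

-- ===== PORT B =====
def check_translation_alt (record : List String) (nums : List Int) : Bool :=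
  let p := record.foldl
    (fun (p : List Int × Int) c =>
      if c = "#" then (p.1, p.2 + 1)
      else if p.2 ≠ 0 then (p.1 ++ [p.2], (0 : Int)) else (p.1, (0 : Int)))
    ([], 0)
  (if p.2 ≠ 0 then p.1 ++ [p.2] else p.1) == nums

-- ===== PRECONDITION & SPEC =====
def Spec_check_translation (record : List String) (nums : List Int) (out : Bool) : Prop := out = check_translation_alt record nums
instance (record : List String) (nums : List Int) (out : Bool) : Decidable (Spec_check_translation record nums out) := by unfold Spec_check_translation; infer_instance

-- ===== CLAIM (what is proved, stated in full; the proofs are below) =====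
def Claim_equal_check_translation : Prop := ∀ (record : List String) (nums : List Int), Dom_check_translation record nums → Spec_check_translation record nums (check_translation record nums)

-- ===== LEMMAS AND PROOFS =====

-- ===== VERDICT (by name: the statement is the Claim_ definition above) =====
-- reference run-length computation, front-to-back with current-run accumulator
def pvRuns : List String → Int → List Int
  | [], cur => if cur ≠ 0 then [cur] else []
  | c :: t, cur =>
      if c = "#" then pvRuns t (cur + 1)
      else if cur ≠ 0 then cur :: pvRuns t 0 else pvRuns t 0

theorem pvRuns_pos (l : List String) (c : Int) (hc : 0 < c) :
    pvRuns l c = (c + (pvHp l : Int)) :: pvRuns (l.drop (pvHp l)) 0 := by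
  induction l generalizing c with
  | nil => simp [pvRuns, pvHp]; omega
  | cons x t ih =>
      by_cases hx : x = "#"
      · rw [pvRuns, if_pos hx, ih (c + 1) (by omega), pvHp, if_pos hx]
        simp
        omega
      · rw [pvRuns, if_neg hx, if_pos (by omega), pvHp, if_neg hx]
        simp [pvRuns, hx]

theorem pvRuns_decomp (l : List String) (hl : 0 < pvHp l) :
    pvRuns l 0 = ((pvHp l : Int)) :: pvRuns (l.drop (pvHp l)) 0 := by
  match l with
  | [] => simp [pvHp] at hl
  | x :: t =>
      have hx : x = "#" := by
        by_contra hx; rw [pvHp, if_neg hx] at hl; omega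
      simp only [pvRuns, if_pos hx, zero_add, pvHp]
      rw [pvRuns_pos t 1 (by omega)]
      simp [hx]
      omega

theorem pvOuterA_eq (record : List String) (nums : List Int) (idx i : Nat) :
    idx ≤ nums.length →
    pvOuterA record nums idx i = decide (pvRuns (record.drop i) 0 = nums.drop idx) := by
  fun_induction pvOuterA record nums idx i with
  | case1 i h p hc =>
      intro _
      have heq := pvInnerA_eq record i 0
      have hp2 : p.2 = pvHp (record.drop i) := by
        simp [show p = pvInnerA record i 0 from rfl, heq]
      rw [pvRuns_decomp _ (by omega), List.drop_length]
      simp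
  | case2 idx i h p hc h1 h2 =>
      intro hle
      have hidx : idx < nums.length := by omega
      have heq := pvInnerA_eq record i 0
      have hp2 : p.2 = pvHp (record.drop i) := by
        simp [show p = pvInnerA record i 0 from rfl, heq]
      rw [pvRuns_decomp (record.drop i) (by omega), List.drop_eq_getElem_cons hidx]
      have hg : nums.getD idx 0 = nums[idx] := List.getD_eq_getElem nums 0 hidx
      symm
      simp only [decide_eq_false_iff_not]
      intro hcon
      apply h2
      rw [hg, ← (List.cons.injEq _ _ _ _ |>.mp hcon |>.1), hp2]
  | case3 idx i h p hc h1 h2 ih =>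
      intro hle
      have hidx : idx < nums.length := by omega
      have heq := pvInnerA_eq record i 0
      have hp1 : p.1 = i + pvHp (record.drop i) := by
        simp [show p = pvInnerA record i 0 from rfl, heq]
      have hp2 : p.2 = pvHp (record.drop i) := by
        simp [show p = pvInnerA record i 0 from rfl, heq]
      have hg : nums.getD idx 0 = nums[idx] := List.getD_eq_getElem nums 0 hidx
      have hhead : (pvHp (record.drop i) : Int) = nums[idx] := by
        rw [← hg, ← hp2]
        omega
      have hdrop : record.drop (p.1 - 1 + 1) = (record.drop i).drop (pvHp (record.drop i)) := by
        rw [List.drop_drop, hp1]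
        congr 1
        omega
      rw [ih (by omega), hdrop, decide_eq_decide]
      rw [pvRuns_decomp (record.drop i) (by omega), List.drop_eq_getElem_cons hidx]
      simp only [List.cons.injEq, hhead, true_and]
  | case4 idx i h p hc ih =>
      intro hle
      have heq := pvInnerA_eq record i 0
      have hp2 : pvHp (record.drop i) = 0 := by
        have h2 : p.2 = pvHp (record.drop i) := by
          simp [show p = pvInnerA record i 0 from rfl, heq]
        omega
      rw [ih hle]
      congr 1
      rw [List.drop_eq_getElem_cons h, pvRuns]
      have hx : record[i] ≠ "#" := by
        intro hx
        rw [List.drop_eq_getElem_cons h, pvHp, if_pos hx] at hp2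
        omega
      rw [if_neg hx]
      simp
  | case5 idx i h =>
      intro hle
      rw [List.drop_eq_nil_of_le (by omega)]
      have h0 : pvRuns ([] : List String) 0 = [] := by simp [pvRuns]
      rw [h0]
      rcases Nat.lt_or_ge idx nums.length with hlt | hge
      · have hne : nums.drop idx ≠ [] := by
          simp [List.drop_eq_nil_iff]
          omega
        simp [Ne.symm hne]
        omega
      · have hnil : nums.drop idx = [] := List.drop_eq_nil_of_le hge
        simp [hnil]
        omega

theorem pvFoldB (l : List String) (acc : List Int) (cur : Int) :
    (let p := l.foldl
        (fun (p : List Int × Int) c =>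
          if c = "#" then (p.1, p.2 + 1)
          else if p.2 ≠ 0 then (p.1 ++ [p.2], (0 : Int)) else (p.1, (0 : Int)))
        (acc, cur)
     if p.2 ≠ 0 then p.1 ++ [p.2] else p.1) = acc ++ pvRuns l cur := by
  induction l generalizing acc cur with
  | nil =>
      simp only [List.foldl, pvRuns]
      split <;> simp
  | cons x t ih =>
      simp only [List.foldl]
      by_cases hx : x = "#"
      · rw [if_pos hx, pvRuns, if_pos hx, ih]
      · rw [if_neg hx, pvRuns, if_neg hx]
        by_cases hcur : cur ≠ 0
        · rw [if_pos hcur, if_pos hcur, ih]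
          simp
        · rw [if_neg hcur, if_neg hcur, ih]

theorem check_translation_spec : Claim_equal_check_translation := by
  intro record nums _
  unfold Spec_check_translation
  unfold check_translation check_translation_alt
  have hb := pvFoldB record [] 0
  simp only at hb
  rw [pvOuterA_eq record nums 0 0 (by omega)]
  show _ = ((if _ ≠ (0:Int) then _ ++ [_] else _) == nums)
  rw [hb]
  by_cases hEq : pvRuns record 0 = nums
  · simp [hEq]
  · simp [hEq]
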